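-- pv_equiv track=rewrite | github.com/Artsen/ColorCraft | backend/color_theory.py | detect_triadic
-- ===== SOURCE A (Python) =====
-- def hue_distance(h1, h2):
--     """Calculate shortest distance between two hues on color wheel."""
--     diff = abs(h1 - h2)
--     return min(diff, 360 - diff)
--
-- def detect_triadic(hues, tolerance=30):
--     """Detect triadic harmony (120° apart)."""
--     triads = []
--     n = len(hues)
--     for i in range(n):
--         for j in range(i + 1, n):
--             for k in range(j + 1, n):
--                 h1, h2, h3 = hues[i], hues[j], hues[k]
--
--                 # Check if roughly 120° apart
--                 d12 = hue_distance(h1, h2)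
--                 d23 = hue_distance(h2, h3)
--                 d31 = hue_distance(h3, h1)
--
--                 if (abs(d12 - 120) <= tolerance and
--                     abs(d23 - 120) <= tolerance and
--                     abs(d31 - 120) <= tolerance):
--                     triads.append((i, j, k))
--
--     return triads
-- ===== SOURCE B (Python) =====
-- def hue_distance(h1, h2):
--     """Calculate shortest distance between two hues on color wheel."""
--     diff = abs(h1 - h2)
--     return min(diff, 360 - diff)
--
-- def detect_triadic(hues, tolerance=30):
--     """Detect triadic harmony (120° apart) by triangle enumeration on the
--     'roughly 120° apart' graph instead of scanning all index triples."""
--     n = len(hues)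
--     # adjacency: nbrs[a] lists every index k (ascending) whose hue is ~120° from hues[a]
--     nbrs = [[k for k in range(n)
--              if abs(hue_distance(hues[a], hues[k]) - 120) <= tolerance]
--             for a in range(n)]
--     nbr_sets = [set(l) for l in nbrs]
--     triads = []
--     for i in range(n):
--         for j in nbrs[i]:          # each edge (i, j) with i < j
--             if j <= i:
--                 continue
--             for k in nbrs[j]:      # common neighbors k > j of i and j
--                 if k > j and k in nbr_sets[i]:
--                     triads.append((i, j, k))
--     return triads
-- ===== Notes on version B (the rewrite author's own statement) =====
-- stated objective: faster
-- what changed: B builds the 'roughly 120° apart' adjacency lists (plus membership sets) once and enumerates triangles of that graph — for each edge (i,j) it scans j's neighbors above j and keeps the common neighbors of i — instead of A's brute-force test of every index triple.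
import Mathlib
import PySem

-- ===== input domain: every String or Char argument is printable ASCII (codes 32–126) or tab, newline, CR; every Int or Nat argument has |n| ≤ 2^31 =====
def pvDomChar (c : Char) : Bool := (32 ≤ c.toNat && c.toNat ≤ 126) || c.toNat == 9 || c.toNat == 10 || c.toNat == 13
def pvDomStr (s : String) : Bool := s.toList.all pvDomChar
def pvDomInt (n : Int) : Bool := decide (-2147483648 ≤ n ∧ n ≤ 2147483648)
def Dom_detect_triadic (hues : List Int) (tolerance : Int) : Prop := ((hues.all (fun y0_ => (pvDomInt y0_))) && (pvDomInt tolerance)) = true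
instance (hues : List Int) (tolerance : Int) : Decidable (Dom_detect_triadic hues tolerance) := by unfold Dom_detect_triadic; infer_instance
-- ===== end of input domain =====

-- B replaces A's scan of all index triples by building the 'roughly 120° apart'
-- adjacency lists once and enumerating triangles (edges plus common neighbors) of that graph.

-- ===== PORT A =====
def hue_distance (h1 h2 : Int) : Int :=
  let diff := |h1 - h2|
  min diff (360 - diff)

def detect_triadic (hues : List Int) (tolerance : Int) : List (Int × Int × Int) :=
  let n : Int := hues.length
  (PySem.List.pyRange 0 n 1).foldl (fun triads i =>
    (PySem.List.pyRange (i + 1) n 1).foldl (fun triads j =>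
      (PySem.List.pyRange (j + 1) n 1).foldl (fun triads k =>
        let h1 := PySem.List.pyGetD hues i 0
        let h2 := PySem.List.pyGetD hues j 0
        let h3 := PySem.List.pyGetD hues k 0
        let d12 := hue_distance h1 h2
        let d23 := hue_distance h2 h3
        let d31 := hue_distance h3 h1
        if |d12 - 120| ≤ tolerance ∧ |d23 - 120| ≤ tolerance ∧ |d31 - 120| ≤ tolerance then
          triads ++ [(i, j, k)]
        else triads) triads) triads) []

-- ===== PORT B =====
-- the edge test of Source B: hues[a] and hues[b] are roughly 120° apart
def pvEdge (hues : List Int) (tolerance a b : Int) : Bool :=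
  decide (|hue_distance (PySem.List.pyGetD hues a 0) (PySem.List.pyGetD hues b 0) - 120| ≤ tolerance)

-- nbrs[a] of Source B: indices k (ascending) whose hue is ~120° from hues[a]
def tri_nbrs (hues : List Int) (tolerance : Int) (a : Int) : List Int :=
  (PySem.List.pyRange 0 (hues.length : Int) 1).filter (fun k => pvEdge hues tolerance a k)

def detect_triadic_alt (hues : List Int) (tolerance : Int) : List (Int × Int × Int) :=
  let n : Int := hues.length
  let nbrs : List (List Int) := (PySem.List.pyRange 0 n 1).map (tri_nbrs hues tolerance)
  let nbrSets : List (PySem.Set Int) := nbrs.map PySem.Set.ofList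
  (PySem.List.pyRange 0 n 1).foldl (fun triads i =>
    (PySem.List.pyGetD nbrs i []).foldl (fun triads j =>
      if j ≤ i then triads
      else
        (PySem.List.pyGetD nbrs j []).foldl (fun triads k =>
          if j < k ∧ PySem.Set.contains (PySem.List.pyGetD nbrSets i PySem.Set.empty) k then
            triads ++ [(i, j, k)]
          else triads) triads) triads) []

-- ===== PRECONDITION & SPEC =====
def Spec_detect_triadic (hues : List Int) (tolerance : Int) (out : List (Int × Int × Int)) : Prop := out = detect_triadic_alt hues tolerance
instance (hues : List Int) (tolerance : Int) (out : List (Int × Int × Int)) : Decidable (Spec_detect_triadic hues tolerance out) := by unfold Spec_detect_triadic; infer_instance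

-- ===== CLAIM (what is proved, stated in full; the proofs are below) =====
def Claim_equal_detect_triadic : Prop := ∀ (hues : List Int) (tolerance : Int), Dom_detect_triadic hues tolerance → Spec_detect_triadic hues tolerance (detect_triadic hues tolerance)

-- ===== LEMMAS AND PROOFS =====

lemma pvEdge_comm (hues : List Int) (tol a b : Int) : pvEdge hues tol a b = pvEdge hues tol b a := by
  unfold pvEdge hue_distance
  rw [abs_sub_comm (PySem.List.pyGetD hues a 0)]

-- canonical middle form both ports are reduced to
def canonK (hues : List Int) (tol i j : Int) : List (Int × Int × Int) :=
  ((PySem.List.pyRange (j + 1) (hues.length : Int) 1).filter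
      (fun k => pvEdge hues tol j k && pvEdge hues tol i k)).map (fun k => (i, j, k))

def canon (hues : List Int) (tol : Int) : List (Int × Int × Int) :=
  (PySem.List.pyRange 0 (hues.length : Int) 1).flatMap (fun i =>
    (PySem.List.pyRange (i + 1) (hues.length : Int) 1).flatMap (fun j =>
      if pvEdge hues tol i j then canonK hues tol i j else []))

lemma flatMap_congr_mem {α β : Type} {f g : α → List β} {l : List α}
    (h : ∀ x ∈ l, f x = g x) : l.flatMap f = l.flatMap g := by
  induction l with
  | nil => rfl
  | cons x xs ih =>
    simp only [List.flatMap_cons, h x (List.mem_cons_self ..),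
      ih (fun y hy => h y (List.mem_cons_of_mem _ hy))]

lemma flatMap_tri_nbrs {β : Type} (hues : List Int) (tol a : Int) (g : Int → List β) :
    (tri_nbrs hues tol a).flatMap g
    = (PySem.List.pyRange 0 (hues.length : Int) 1).flatMap
        (fun x => if pvEdge hues tol a x then g x else []) := by
  show ((PySem.List.pyRange 0 (hues.length : Int) 1).filter _).flatMap g = _
  generalize PySem.List.pyRange 0 (hues.length : Int) 1 = l
  induction l with
  | nil => rfl
  | cons x xs ih => cases hx : pvEdge hues tol a x <;> simp [hx, ih]

lemma filter_const_and {α : Type} (c : Bool) (p : α → Bool) (l : List α) :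
    l.filter (fun x => c && p x) = if c then l.filter p else [] := by
  cases c <;> simp

lemma A_eq_canon (hues : List Int) (tol : Int) :
    detect_triadic hues tol = canon hues tol := by
  unfold detect_triadic canon
  simp only [PySem.List.foldl_append_ite, PySem.List.foldl_append_eq_flatMap, List.nil_append]
  apply flatMap_congr_mem; intro i _
  apply flatMap_congr_mem; intro j _
  have hdec : (fun k => decide
        (|hue_distance (PySem.List.pyGetD hues i 0) (PySem.List.pyGetD hues j 0) - 120| ≤ tol ∧
         |hue_distance (PySem.List.pyGetD hues j 0) (PySem.List.pyGetD hues k 0) - 120| ≤ tol ∧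
         |hue_distance (PySem.List.pyGetD hues k 0) (PySem.List.pyGetD hues i 0) - 120| ≤ tol))
      = (fun k => pvEdge hues tol i j && (pvEdge hues tol j k && pvEdge hues tol k i)) := by
    funext k; simp [pvEdge]
  rw [hdec, filter_const_and, apply_ite (List.map (fun k => (i, j, k)))]
  unfold canonK
  rw [List.filter_congr (fun k _ => by rw [pvEdge_comm hues tol k i])]
  simp

lemma mem_tri_nbrs (hues : List Int) (tol a k : Int) :
    k ∈ tri_nbrs hues tol a ↔ (0 ≤ k ∧ k < (hues.length : Int)) ∧ pvEdge hues tol a k = true := by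
  unfold tri_nbrs
  simp [List.mem_filter, PySem.List.mem_pyRange_one]

lemma Bij_eq_canonK (hues : List Int) (tol i j : Int) (hi : 0 ≤ i) (hij : i < j)
    (hj : j < (hues.length : Int)) :
    ((tri_nbrs hues tol j).filter
        (fun k => decide (j < k ∧ PySem.Set.contains (PySem.Set.ofList (tri_nbrs hues tol i)) k))).map
      (fun k => (i, j, k))
    = canonK hues tol i j := by
  unfold canonK
  congr 1
  have hnj : tri_nbrs hues tol j
      = (PySem.List.pyRange 0 (hues.length : Int) 1).filter (fun k => pvEdge hues tol j k) := rfl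
  rw [hnj, List.filter_filter,
    PySem.List.pyRange_one_append 0 (j + 1) (hues.length : Int) (by omega) (by omega),
    List.filter_append]
  have h1 : (PySem.List.pyRange 0 (j + 1) 1).filter
      (fun k => decide (j < k ∧ PySem.Set.contains (PySem.Set.ofList (tri_nbrs hues tol i)) k)
        && pvEdge hues tol j k) = [] := by
    apply List.filter_eq_nil_iff.mpr
    intro k hk
    rw [PySem.List.mem_pyRange_one] at hk
    simp only [Bool.and_eq_true, decide_eq_true_eq, not_and]
    intro ⟨hjk, _⟩
    omega
  rw [h1, List.nil_append]
  apply List.filter_congr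
  intro k hk
  rw [PySem.List.mem_pyRange_one] at hk
  have hjk : j < k := by omega
  have hd : decide (j < k ∧ PySem.Set.contains (PySem.Set.ofList (tri_nbrs hues tol i)) k = true)
      = pvEdge hues tol i k := by
    cases he : pvEdge hues tol i k
    · simp only [decide_eq_false_iff_not, not_and]
      intro _ hc
      rw [PySem.Set.contains_iff, PySem.Set.mem_ofList, mem_tri_nbrs] at hc
      rw [hc.2] at he; exact absurd he (by simp)
    · simp only [decide_eq_true_eq]
      refine ⟨hjk, ?_⟩
      rw [PySem.Set.contains_iff, PySem.Set.mem_ofList, mem_tri_nbrs]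
      exact ⟨⟨by omega, by omega⟩, he⟩
  rw [hd, Bool.and_comm]

lemma B_eq_canon (hues : List Int) (tol : Int) :
    detect_triadic_alt hues tol = canon hues tol := by
  unfold detect_triadic_alt
  simp only [PySem.List.foldl_append_ite]
  have hstep : ∀ (i : Int) (l : List Int) (acc : List (Int × Int × Int)),
      l.foldl (fun triads j =>
        if j ≤ i then triads
        else triads ++ ((PySem.List.pyGetD ((PySem.List.pyRange 0 (hues.length : Int) 1).map (tri_nbrs hues tol)) j []).filter
            (fun k => decide (j < k ∧ PySem.Set.contains
              (PySem.List.pyGetD (((PySem.List.pyRange 0 (hues.length : Int) 1).map (tri_nbrs hues tol)).map PySem.Set.ofList) i PySem.Set.empty) k))).map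
          (fun k => (i, j, k))) acc
      = acc ++ l.flatMap (fun j =>
          if j ≤ i then []
          else ((PySem.List.pyGetD ((PySem.List.pyRange 0 (hues.length : Int) 1).map (tri_nbrs hues tol)) j []).filter
            (fun k => decide (j < k ∧ PySem.Set.contains
              (PySem.List.pyGetD (((PySem.List.pyRange 0 (hues.length : Int) 1).map (tri_nbrs hues tol)).map PySem.Set.ofList) i PySem.Set.empty) k))).map
          (fun k => (i, j, k))) := by
    intro i l
    induction l with
    | nil => simp
    | cons j js ih =>
      intro acc
      rw [List.foldl_cons, List.flatMap_cons]
      by_cases hji : j ≤ i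
      · rw [if_pos hji, if_pos hji, ih, List.nil_append]
      · rw [if_neg hji, if_neg hji, ih, List.append_assoc]
  simp only [hstep]
  rw [PySem.List.foldl_append_eq_flatMap, List.nil_append]
  unfold canon
  apply flatMap_congr_mem
  intro i hi
  rw [PySem.List.mem_pyRange_one] at hi
  rw [List.map_map, PySem.List.pyGetD_map_pyRange_of_nonneg _ _ _ _ hi.1 hi.2,
    PySem.List.pyGetD_map_pyRange_of_nonneg _ _ _ _ hi.1 hi.2]
  have hin : ∀ j ∈ tri_nbrs hues tol i,
      (if j ≤ i then ([] : List (Int × Int × Int))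
       else ((PySem.List.pyGetD ((PySem.List.pyRange 0 (hues.length : Int) 1).map (tri_nbrs hues tol)) j []).filter
          (fun k => decide (j < k ∧ PySem.Set.contains ((PySem.Set.ofList ∘ tri_nbrs hues tol) i) k))).map
        (fun k => (i, j, k)))
      = (if j ≤ i then []
         else ((tri_nbrs hues tol j).filter
            (fun k => decide (j < k ∧ PySem.Set.contains (PySem.Set.ofList (tri_nbrs hues tol i)) k))).map
          (fun k => (i, j, k))) := by
    intro j hj
    rw [mem_tri_nbrs] at hj
    rw [PySem.List.pyGetD_map_pyRange_of_nonneg _ _ _ _ hj.1.1 hj.1.2]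
    rfl
  rw [flatMap_congr_mem hin, flatMap_tri_nbrs,
    PySem.List.pyRange_one_append 0 (i + 1) (hues.length : Int) (by omega) (by omega),
    List.flatMap_append]
  have h1 : (PySem.List.pyRange 0 (i + 1) 1).flatMap (fun x =>
      if pvEdge hues tol i x then
        (if x ≤ i then ([] : List (Int × Int × Int))
         else ((tri_nbrs hues tol x).filter
            (fun k => decide (x < k ∧ PySem.Set.contains (PySem.Set.ofList (tri_nbrs hues tol i)) k))).map
          (fun k => (i, x, k)))
      else []) = [] := by
    apply List.flatMap_eq_nil_iff.mpr
    intro j hj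
    rw [PySem.List.mem_pyRange_one] at hj
    have hji : j ≤ i := by omega
    split <;> simp
  rw [h1, List.nil_append]
  apply flatMap_congr_mem
  intro j hj
  rw [PySem.List.mem_pyRange_one] at hj
  have hji : ¬ j ≤ i := by omega
  simp only [hji, if_false]
  by_cases he : pvEdge hues tol i j
  · simp only [he, if_true]
    exact Bij_eq_canonK hues tol i j hi.1 (by omega) hj.2
  · simp only [Bool.not_eq_true] at he
    simp [he]

-- ===== VERDICT (by name: the statement is the Claim_ definition above) =====
theorem detect_triadic_spec : Claim_equal_detect_triadic := by
  intro hues tol _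
  unfold Spec_detect_triadic
  rw [A_eq_canon, B_eq_canon]
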